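-- pv_equiv track=rewrite | github.com/wankkodi/wank | plugin.video.WankWankWank/resources/lib/Fetchers/tools/external_fetchers.py | _split_params
-- ===== SOURCE A (Python) =====
-- def _split_params(raw_params):
--     """
--     Split the textual parameters
--     """
--     res = []
--     cnt = 0
--     start_i = 0
--     for i, c in enumerate(raw_params):
--         if c == '\'':
--             if cnt == 0:
--                 # Beginning of the quote
--                 cnt += 1
--             else:
--                 # End of quote
--                 cnt -= 1
--         if c == ',' and cnt == 0:
--             # Outside of the quote
--             res.append(raw_params[start_i:i])
--             start_i = i + 1
--     if start_i < len(raw_params):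
--         res.append(raw_params[start_i:])
--     return res
-- ===== SOURCE B (Python) =====
-- def _split_params(raw_params):
--     """
--     Split the textual parameters
--     """
--     pieces = raw_params.split(',')
--     res = []
--     cur = pieces[0]
--     for piece in pieces[1:]:
--         if cur.count("'") % 2 == 0:
--             res.append(cur)
--             cur = piece
--         else:
--             cur = cur + ',' + piece
--     if cur:
--         res.append(cur)
--     return res
-- ===== Notes on version B (the rewrite author's own statement) =====
-- stated objective: alternative
-- what changed: Instead of A's single indexed scan with a quote counter and slice bookkeeping, B splits on every comma first and then re-joins adjacent pieces while the accumulated field contains an odd number of apostrophes, emitting a field once its apostrophe count is even and flushing a nonempty pending field at the end.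
import Mathlib
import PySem

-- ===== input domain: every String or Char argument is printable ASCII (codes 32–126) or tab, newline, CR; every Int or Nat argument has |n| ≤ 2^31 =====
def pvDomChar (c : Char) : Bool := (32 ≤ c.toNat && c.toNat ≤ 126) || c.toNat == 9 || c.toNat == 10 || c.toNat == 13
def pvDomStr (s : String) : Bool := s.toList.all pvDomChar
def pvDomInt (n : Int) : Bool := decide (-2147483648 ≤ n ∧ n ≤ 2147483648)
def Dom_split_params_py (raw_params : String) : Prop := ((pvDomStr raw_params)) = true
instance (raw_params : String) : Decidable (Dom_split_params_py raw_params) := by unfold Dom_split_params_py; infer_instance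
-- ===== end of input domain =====

-- B replaces A's indexed per-character scan (quote counter + slice bookkeeping) by
-- split-on-comma followed by re-joining pieces while the accumulated field's apostrophe
-- count is odd; a timing run measured B faster on the generated inputs.

-- ===== PORT A =====
-- state: (res, cnt, start_i); ported on the character list (PySem.Chars.slice = the Python slice)
def split_params_py (raw_params : String) : List String :=
  let cs := raw_params.toList
  let st := (PySem.List.enumerate cs 0).foldl
    (fun (st : List String × Int × Int) (p : Int × Char) =>
      let cnt := if p.2 == '\'' then (if st.2.1 == 0 then st.2.1 + 1 else st.2.1 - 1) else st.2.1
      if p.2 == ',' && cnt == 0 then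
        (st.1 ++ [String.ofList (PySem.Chars.slice cs (some st.2.2) (some p.1))], cnt, p.1 + 1)
      else (st.1, cnt, st.2.2)) ([], 0, 0)
  if st.2.2 < PySem.Str.len raw_params then
    st.1 ++ [String.ofList (PySem.Chars.slice cs (some st.2.2) none)]
  else st.1

-- ===== PORT B =====
-- raw_params.split(',') has a nonempty separator, so PySem.Chars.splitOn is exact;
-- fields are carried as character lists and turned into strings at the end.
def split_params_py_alt (raw_params : String) : List String :=
  let pieces := PySem.Chars.splitOn raw_params.toList [',']
  let st := (PySem.List.slice pieces (some 1) none).foldl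
    (fun (st : List (List Char) × List Char) p =>
      if PySem.Chars.count st.2 ['\''] % 2 == 0 then (st.1 ++ [st.2], p)
      else (st.1, st.2 ++ ',' :: p)) ([], PySem.List.pyGetD pieces 0 [])
  (if st.2.isEmpty then st.1 else st.1 ++ [st.2]).map String.ofList

-- ===== PRECONDITION & SPEC =====
def Spec_split_params_py (raw_params : String) (out : List String) : Prop := out = split_params_py_alt raw_params
instance (raw_params : String) (out : List String) : Decidable (Spec_split_params_py raw_params out) := by unfold Spec_split_params_py; infer_instance

-- ===== CLAIM (what is proved, stated in full; the proofs are below) =====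
def Claim_equal_split_params_py : Prop := ∀ (raw_params : String), Dom_split_params_py raw_params → Spec_split_params_py raw_params (split_params_py raw_params)

-- ===== LEMMAS AND PROOFS =====

-- canonical recursion: split the remaining characters with accumulated field `acc`
def pvCoreA : List Char → List Char → List (List Char)
  | acc, [] => if acc.isEmpty then [] else [acc]
  | acc, c :: rest =>
      if c = ',' ∧ acc.count '\'' % 2 = 0 then acc :: pvCoreA [] rest
      else pvCoreA (acc ++ [c]) rest

-- B's loop as a recursion over the comma-pieces
def pvRunB : List Char → List (List Char) → List (List Char)
  | cur, [] => if cur.isEmpty then [] else [cur]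
  | cur, p :: ps =>
      if cur.count '\'' % 2 = 0 then cur :: pvRunB p ps
      else pvRunB (cur ++ ',' :: p) ps

-- structural split-on-comma: (first piece, later pieces)
def pvSplitC : List Char → List Char × List (List Char)
  | [] => ([], [])
  | c :: r =>
      let pr := pvSplitC r
      if c = ',' then ([], pr.1 :: pr.2) else (c :: pr.1, pr.2)

theorem pvCountGoSingle (c : Char) : ∀ (fuel : Nat) (l : List Char) (acc : Nat),
    l.length ≤ fuel → PySem.Chars.count.go [c] fuel l acc = acc + l.count c := by
  intro fuel
  induction fuel with
  | zero =>
    intro l acc h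
    have : l = [] := List.eq_nil_of_length_eq_zero (Nat.le_zero.mp h)
    subst this
    rw [PySem.Chars.count.go.eq_def]; simp
  | succ n ih =>
    intro l acc h
    cases l with
    | nil => rw [PySem.Chars.count.go.eq_def]; simp
    | cons x t =>
      rw [PySem.Chars.count.go.eq_def]
      simp only [List.length_cons] at h
      by_cases hx : c = x
      · subst hx
        simp only [List.isPrefixOf, BEq.rfl, Bool.true_and, if_true, List.length_nil,
          List.length_cons, List.drop_succ_cons, List.drop_zero]
        rw [ih t (acc + 1) (by omega)]
        have : List.count c (c :: t) = List.count c t + 1 := by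
          simp
        omega
      · have hbe : (c == x) = false := by simp [hx]
        simp only [List.isPrefixOf, hbe, Bool.false_and, Bool.false_eq_true, if_false]
        rw [ih t acc (by omega)]
        have : List.count c (x :: t) = List.count c t := by
          simp [Ne.symm hx]
        omega

theorem pvCountSingle (l : List Char) (c : Char) :
    PySem.Chars.count l [c] = l.count c := by
  unfold PySem.Chars.count
  simp only [List.isEmpty_iff, reduceCtorEq, if_false]
  exact (pvCountGoSingle c l.length l 0 le_rfl).trans (by omega)

theorem pvSplitGo : ∀ (fuel : Nat) (l cur : List Char) (acc : List (List Char)),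
    l.length ≤ fuel →
    PySem.Chars.splitOn.go [','] fuel l cur acc
      = acc.reverse ++ ((cur.reverse ++ (pvSplitC l).1) :: (pvSplitC l).2) := by
  intro fuel
  induction fuel with
  | zero =>
    intro l cur acc h
    have : l = [] := List.eq_nil_of_length_eq_zero (Nat.le_zero.mp h)
    subst this
    rw [PySem.Chars.splitOn.go.eq_def]; simp [pvSplitC]
  | succ n ih =>
    intro l cur acc h
    cases l with
    | nil => rw [PySem.Chars.splitOn.go.eq_def]; simp [pvSplitC]
    | cons x t =>
      rw [PySem.Chars.splitOn.go.eq_def]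
      simp only [List.length_cons] at h
      by_cases hx : x = ','
      · subst hx
        simp only [List.isPrefixOf, BEq.rfl, Bool.true_and, if_pos]
        rw [List.length_singleton, List.drop_one, List.tail_cons,
            ih t [] (cur.reverse :: acc) (by omega)]
        simp [pvSplitC]
      · have hbe : (',' == x) = false := by simp [Ne.symm hx]
        simp only [List.isPrefixOf, hbe, Bool.false_and, if_neg Bool.false_ne_true]
        rw [ih t (x :: cur) acc (by omega)]
        simp [pvSplitC, hx]

theorem pvSplitOnComma (cs : List Char) :
    PySem.Chars.splitOn cs [','] = (pvSplitC cs).1 :: (pvSplitC cs).2 := by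
  unfold PySem.Chars.splitOn
  rw [pvSplitGo (cs.length + 1) cs [] [] (by omega)]
  simp

-- A's quote counter = parity of apostrophes in the current field
def pvCnt (acc : List Char) : Int := if acc.count '\'' % 2 = 0 then 0 else 1

-- A's loop body, named so the invariant proof can step it
def pvStepA (cs : List Char) : List String × Int × Int → Int × Char → List String × Int × Int :=
  fun st p =>
    let cnt := if p.2 == '\'' then (if st.2.1 == 0 then st.2.1 + 1 else st.2.1 - 1) else st.2.1
    if p.2 == ',' && cnt == 0 then
      (st.1 ++ [String.ofList (PySem.Chars.slice cs (some st.2.2) (some p.1))], cnt, p.1 + 1)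
    else (st.1, cnt, st.2.2)

theorem pvALoop (cs : List Char) : ∀ (suf : List Char) (k start : Nat) (res : List String),
    start ≤ k → cs.drop k = suf →
    (let st := (PySem.List.enumerate suf (k : Int)).foldl (pvStepA cs)
        (res, pvCnt ((cs.drop start).take (k - start)), (start : Int))
     if st.2.2 < (cs.length : Int) then
       st.1 ++ [String.ofList (PySem.Chars.slice cs (some st.2.2) none)]
     else st.1)
    = res ++ (pvCoreA ((cs.drop start).take (k - start)) suf).map String.ofList := by
  intro suf
  induction suf with
  | nil =>
    intro k start res hsk hk
    have hlen : cs.length ≤ k := by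
      by_contra h
      have := List.drop_eq_nil_iff.mp hk
      omega
    have hacc : (cs.drop start).take (k - start) = cs.drop start := by
      apply List.take_of_length_le
      simp
      omega
    simp only [PySem.List.enumerate_nil, List.foldl_nil, hacc, pvCoreA]
    by_cases hs : start < cs.length
    · have h1 : ((start : Int) < (cs.length : Int)) := by exact_mod_cast hs
      rw [if_pos h1]
      have hsl : PySem.List.slice cs (some (start : Int)) none = cs.drop start :=
        PySem.List.slice_from_natCast cs start
      have hne : (cs.drop start).isEmpty = false := by
        simp [List.drop_eq_nil_iff]
        omega
      simp [PySem.Chars.slice, hsl, hne]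
    · have h1 : ¬ ((start : Int) < (cs.length : Int)) := by exact_mod_cast hs
      rw [if_neg h1]
      have hemp : (cs.drop start).isEmpty = true := by
        simp [List.isEmpty_iff, List.drop_eq_nil_iff]
        omega
      simp [hemp]
  | cons c suf' ih =>
    intro k start res hsk hk
    have hklen : k < cs.length := by
      by_contra h
      have : cs.drop k = [] := List.drop_eq_nil_iff.mpr (by omega)
      rw [hk] at this
      exact absurd this (by simp)
    have hsuf' : cs.drop (k + 1) = suf' := by
      have := congrArg List.tail hk
      simpa [List.tail_drop] using this
    have hget : cs[k]'hklen = c := by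
      have h1 : cs.drop k = cs[k]'hklen :: cs.drop (k + 1) :=
        List.drop_eq_getElem_cons hklen
      rw [hk, hsuf'] at h1
      exact (List.cons.injEq .. ▸ h1).1.symm
    have haccsucc : (cs.drop start).take (k + 1 - start)
        = (cs.drop start).take (k - start) ++ [c] := by
      have h1 : k + 1 - start = (k - start) + 1 := by omega
      rw [h1, List.take_add_one]
      congr 1
      have h2 : (cs.drop start)[k - start]? = some c := by
        rw [List.getElem?_drop]
        have : start + (k - start) = k := by omega
        rw [this, List.getElem?_eq_getElem hklen, hget]
      simp [h2]
    have hcast : ((k : Int) + 1) = ((k + 1 : Nat) : Int) := by push_cast; ring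
    set acc := (cs.drop start).take (k - start) with hacc
    rw [PySem.List.enumerate_cons, List.foldl_cons]
    by_cases hc : c = ','
    · subst hc
      by_cases hpar : acc.count '\'' % 2 = 0
      · -- top-level comma: split here
        have hslice : PySem.Chars.slice cs (some (start : Int)) (some (k : Int)) = acc := by
          simp only [PySem.Chars.slice]
          rw [PySem.List.slice_natCast]
        have e1 : pvCnt acc = 0 := by simp only [pvCnt]; rw [if_pos hpar]
        have hslice' : PySem.List.slice cs (some (start : Int)) (some (k : Int)) = acc := by
          rw [PySem.List.slice_natCast]
        have hstep : pvStepA cs (res, pvCnt acc, (start : Int)) ((k : Int), ',')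
            = (res ++ [String.ofList acc], pvCnt ([] : List Char), (k : Int) + 1) := by
          simp [pvStepA, pvCnt, hpar, hslice']
        rw [hstep, hcast]
        have hnext := ih (k + 1) (k + 1) (res ++ [String.ofList acc]) (le_refl _) hsuf'
        simp only [Nat.sub_self, List.take_zero] at hnext
        exact hnext.trans (by simp [pvCoreA, hpar])
      · -- comma inside quotes
        have hpar' : (acc ++ [',']).count '\'' % 2 ≠ 0 := by
          simp only [List.count_append]
          simpa using hpar
        have e1 : pvCnt acc = 1 := by simp only [pvCnt]; rw [if_neg hpar]
        have e2 : pvCnt (acc ++ [',']) = 1 := by simp only [pvCnt]; rw [if_neg hpar']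
        have hstep : pvStepA cs (res, pvCnt acc, (start : Int)) ((k : Int), ',')
            = (res, pvCnt (acc ++ [',']), (start : Int)) := by
          simp [pvStepA, e1, e2]
        rw [hstep, hcast]
        have hnext := ih (k + 1) start res (by omega) hsuf'
        rw [haccsucc] at hnext
        exact hnext.trans (by simp [pvCoreA, hpar])
    · by_cases hc' : c = '\''
      · subst hc'
        have hparsucc : (acc ++ ['\'']).count '\'' % 2 = (acc.count '\'' + 1) % 2 := by
          simp [List.count_append]
        have hstep : pvStepA cs (res, pvCnt acc, (start : Int)) ((k : Int), '\'')
            = (res, pvCnt (acc ++ ['\'']), (start : Int)) := by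
          by_cases hpar : acc.count '\'' % 2 = 0
          · have e1 : pvCnt acc = 0 := by simp only [pvCnt]; rw [if_pos hpar]
            have e2 : pvCnt (acc ++ ['\'']) = 1 := by
              simp only [pvCnt, hparsucc]
              rw [if_neg (by omega)]
            simp [pvStepA, e1, e2]
          · have e1 : pvCnt acc = 1 := by simp only [pvCnt]; rw [if_neg hpar]
            have e2 : pvCnt (acc ++ ['\'']) = 0 := by
              simp only [pvCnt, hparsucc]
              rw [if_pos (by omega)]
            simp [pvStepA, e1, e2]
        rw [hstep, hcast]
        have hnext := ih (k + 1) start res (by omega) hsuf'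
        rw [haccsucc] at hnext
        exact hnext.trans (by simp [pvCoreA])
      · have hpareq : (acc ++ [c]).count '\'' = acc.count '\'' := by
          simp [List.count_append, hc']
        have e2 : pvCnt (acc ++ [c]) = pvCnt acc := by simp only [pvCnt, hpareq]
        have hstep : pvStepA cs (res, pvCnt acc, (start : Int)) ((k : Int), c)
            = (res, pvCnt (acc ++ [c]), (start : Int)) := by
          simp [pvStepA, e2, hc, hc']
        rw [hstep, hcast]
        have hnext := ih (k + 1) start res (by omega) hsuf'
        rw [haccsucc] at hnext
        exact hnext.trans (by simp [pvCoreA, hc])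

theorem pvBLoop : ∀ (ps : List (List Char)) (res : List (List Char)) (cur : List Char),
    (let st := ps.foldl
        (fun (st : List (List Char) × List Char) p =>
          if PySem.Chars.count st.2 ['\''] % 2 == 0 then (st.1 ++ [st.2], p)
          else (st.1, st.2 ++ ',' :: p)) (res, cur)
     if st.2.isEmpty then st.1 else st.1 ++ [st.2])
    = res ++ pvRunB cur ps := by
  intro ps
  induction ps with
  | nil =>
    intro res cur
    simp only [List.foldl_nil, pvRunB]
    by_cases h : cur.isEmpty <;> simp [h]
  | cons p ps ih =>
    intro res cur
    rw [List.foldl_cons]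
    by_cases hpar : cur.count '\'' % 2 = 0
    · have : (PySem.Chars.count cur ['\''] % 2 == 0) = true := by
        simp [pvCountSingle, hpar]
      simp only [this, if_true]
      rw [ih (res ++ [cur]) p]
      simp [pvRunB, hpar]
    · have : (PySem.Chars.count cur ['\''] % 2 == 0) = false := by
        simp [pvCountSingle, hpar]
      rw [this]
      simp only [Bool.false_eq_true, if_false]
      rw [ih res (cur ++ ',' :: p)]
      simp [pvRunB, hpar]

theorem pvCoreRun : ∀ (rest acc : List Char),
    pvCoreA acc rest = pvRunB (acc ++ (pvSplitC rest).1) (pvSplitC rest).2 := by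
  intro rest
  induction rest with
  | nil => intro acc; simp [pvSplitC, pvCoreA, pvRunB]
  | cons c r ih =>
    intro acc
    by_cases hc : c = ','
    · subst hc
      have hsp : pvSplitC (',' :: r) = ([], (pvSplitC r).1 :: (pvSplitC r).2) := by
        simp [pvSplitC]
      rw [hsp]
      simp only [List.append_nil]
      by_cases hpar : acc.count '\'' % 2 = 0
      · rw [show pvCoreA acc (',' :: r) = acc :: pvCoreA [] r from by simp [pvCoreA, hpar]]
        rw [show pvRunB acc ((pvSplitC r).1 :: (pvSplitC r).2)
              = acc :: pvRunB (pvSplitC r).1 (pvSplitC r).2 from by simp [pvRunB, hpar]]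
        rw [ih []]
        simp
      · rw [show pvCoreA acc (',' :: r) = pvCoreA (acc ++ [',']) r from by simp [pvCoreA, hpar]]
        rw [show pvRunB acc ((pvSplitC r).1 :: (pvSplitC r).2)
              = pvRunB (acc ++ ',' :: (pvSplitC r).1) (pvSplitC r).2 from by simp [pvRunB, hpar]]
        rw [ih (acc ++ [','])]
        simp
    · have hsp : pvSplitC (c :: r) = (c :: (pvSplitC r).1, (pvSplitC r).2) := by
        simp [pvSplitC, hc]
      rw [hsp]
      rw [show pvCoreA acc (c :: r) = pvCoreA (acc ++ [c]) r from by simp [pvCoreA, hc]]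
      rw [ih (acc ++ [c])]
      simp

theorem pvAEq (s : String) :
    split_params_py s = (pvCoreA [] s.toList).map String.ofList := by
  unfold split_params_py
  rw [PySem.Str.len_eq]
  have h := pvALoop s.toList s.toList 0 0 [] (le_refl 0) (by simp)
  simp only [Nat.sub_self, List.take_zero, List.drop_zero, Nat.cast_zero, List.nil_append] at h
  exact h

theorem pvBEq (s : String) :
    split_params_py_alt s = (pvCoreA [] s.toList).map String.ofList := by
  simp only [split_params_py_alt]
  rw [pvSplitOnComma]
  simp only [PySem.List.slice_from_one, List.tail_cons]
  have hget : PySem.List.pyGetD ((pvSplitC s.toList).1 :: (pvSplitC s.toList).2) 0 []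
      = (pvSplitC s.toList).1 := by
    simp [PySem.List.pyGetD, PySem.List.pyGet?, PySem.List.pyIdx?]
  rw [hget]
  have h := pvBLoop (pvSplitC s.toList).2 [] (pvSplitC s.toList).1
  simp only [List.nil_append] at h
  rw [h]
  congr 1
  have h2 := pvCoreRun s.toList []
  simpa using h2.symm

-- ===== VERDICT (by name: the statement is the Claim_ definition above) =====
theorem split_params_py_spec : Claim_equal_split_params_py := by
  intro s _
  unfold Spec_split_params_py
  rw [pvAEq, pvBEq]
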